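-- pv_equiv track=rewrite | github.com/mike006322/ProjectEuler | Solutions/PE026_reciprocal_cycles/reciprocal_cycles.py | reciprocal_cycles
-- ===== SOURCE A (Python) =====
-- def division_algorithm(n, m):
--     """
--     input integers n, m
--     returns n//m, n - m*(n//m)
--     """
--     if m > n:
--         return 0, n
--     q = n//m
--     return q, n - m*q
--
-- def find_cycle_length(d):
--     """
--     input integer
--     output integer representing the length of the cycle of repeating digits in 1/d
--     """
--     seen = set()
--     k = 1
--     has_cycle = False
--     cycle_length = 0
--     look_for = None
--     found_cycle = False
--     while not has_cycle and k != 0: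
--         k *= 10
--         q, r = division_algorithm(k, d)
--         if r == look_for:
--             has_cycle = True
--         if found_cycle:
--             cycle_length += 1
--         if r in seen and not found_cycle:
--             found_cycle = True
--             look_for = r
--         seen.add(r)
--         k = r
--     return cycle_length
--
-- def reciprocal_cycles(n):
--     """
--     input integer n
--     output list of smallest number d that has largest cycle length of numbers up to n
--     """
--     res = [0]*(n+1)
--     max_length = 0
--     d = 0
--     for i in range(1, n + 1):
--         cycle_length = find_cycle_length(i)
--         if cycle_length > max_length:
--             max_length = cycle_length
--             d = i
--         res[i] = d
--     return res
-- ===== SOURCE B (Python) =====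
-- def find_cycle_length(d):
--     # decimal period of 1/d: walk r -> r*10 % d, remembering the first index of each remainder
--     r = 1 % d
--     pos = {}
--     i = 0
--     while r != 0 and r not in pos:
--         pos[r] = i
--         r = r * 10 % d
--         i += 1
--     return 0 if r == 0 else i - pos[r]
--
-- def reciprocal_cycles(n):
--     out = []
--     best_len = 0
--     best_d = 0
--     for i in range(n + 1):
--         if i > 0:
--             L = find_cycle_length(i)
--             if L > best_len:
--                 best_len = L
--                 best_d = i
--         out.append(best_d)
--     return out
-- ===== Notes on version B (the rewrite author's own statement) =====
-- stated objective: faster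
-- what changed: find_cycle_length is recomputed as the decimal period directly: a single pass that repeatedly multiplies the remainder by ten modulo d, with a dict mapping each remainder to its first index, returning the index difference at the first repeated remainder (zero if the remainder vanishes), instead of A's flag-driven walk that detects a repeat with a set and then counts through one whole extra cycle; the outer scan appends the running best divisor instead of preallocating and setting.
import Mathlib
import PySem

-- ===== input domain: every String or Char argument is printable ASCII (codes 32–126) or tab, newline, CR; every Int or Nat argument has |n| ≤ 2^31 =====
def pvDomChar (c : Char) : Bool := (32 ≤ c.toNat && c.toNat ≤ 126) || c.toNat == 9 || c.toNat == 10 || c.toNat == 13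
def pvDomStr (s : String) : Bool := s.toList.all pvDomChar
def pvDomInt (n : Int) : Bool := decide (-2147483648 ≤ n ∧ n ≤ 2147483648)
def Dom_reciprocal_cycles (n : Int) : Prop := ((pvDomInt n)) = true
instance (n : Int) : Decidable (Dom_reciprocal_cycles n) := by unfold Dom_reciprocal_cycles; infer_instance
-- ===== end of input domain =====

-- B computes the decimal period of 1/d in a single pass with a remainder -> first-index dict and
-- returns the index difference at the first repeat (A walks on with flag variables and counts a whole
-- extra cycle); the outer scan appends the running best divisor instead of preallocate-and-set.
-- Both functions are total; equality of the return values is proved for every Int n.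

-- ===== PORT A =====
def division_algorithm (n m : Int) : Int × Int :=
  if m > n then (0, n)
  else
    let q := PySem.Int.floordiv n m
    (q, n - m * q)

def findCycleA_loop (d : Int) : Nat → PySem.Set Int → Int → Bool → Int → Option Int → Bool → Int
  | 0, _, _, _, cycle_length, _, _ => cycle_length
  | fuel+1, seen, k, has_cycle, cycle_length, look_for, found_cycle =>
    if has_cycle = false ∧ k ≠ 0 then
      let k1 := k * 10
      let r := (division_algorithm k1 d).2
      let has_cycle2 := if (match look_for with | some v => r == v | none => false) then true else has_cycle
      let cycle_length2 := if found_cycle then cycle_length + 1 else cycle_length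
      let fc_lf := if PySem.Set.contains seen r = true ∧ found_cycle = false then (true, some r)
                   else (found_cycle, look_for)
      findCycleA_loop d fuel (PySem.Set.add seen r) r has_cycle2 cycle_length2 fc_lf.2 fc_lf.1
    else cycle_length

def findCycleA (d : Int) : Int :=
  findCycleA_loop d (2 * d.toNat + 4) PySem.Set.empty 1 false 0 none false

def reciprocal_cycles (n : Int) : List Int :=
  let init : List Int × Int × Int := (List.replicate (n + 1).toNat 0, 0, 0)
  let st := (PySem.List.pyRange 1 (n + 1) 1).foldl (fun st i =>
      let cl := findCycleA i
      let ml_d := if cl > st.2.1 then (cl, i) else st.2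
      (st.1.set i.toNat ml_d.2, ml_d)) init
  st.1

-- ===== PORT B =====
def findCycleB_loop (d : Int) : Nat → PySem.Dict Int Int → Int → Int → Int
  | 0, pos, r, i => if r == 0 then 0 else i - PySem.Dict.getD pos r 0
  | fuel+1, pos, r, i =>
    if r ≠ 0 ∧ PySem.Dict.contains pos r = false then
      findCycleB_loop d fuel (PySem.Dict.insert pos r i) (PySem.Int.mod (r * 10) d) (i + 1)
    else
      if r == 0 then 0 else i - PySem.Dict.getD pos r 0

def findCycleB (d : Int) : Int :=
  findCycleB_loop d (d.toNat + 2) PySem.Dict.empty (PySem.Int.mod 1 d) 0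

def reciprocal_cycles_alt (n : Int) : List Int :=
  let st := (PySem.List.pyRange 0 (n + 1) 1).foldl (fun (st : List Int × Int × Int) i =>
      let bl_bd := if i > 0 then
          let L := findCycleB i
          if L > st.2.1 then (L, i) else st.2
        else st.2
      (st.1 ++ [bl_bd.2], bl_bd)) ([], 0, 0)
  st.1

-- ===== PRECONDITION & SPEC =====
def Spec_reciprocal_cycles (n : Int) (out : List Int) : Prop := out = reciprocal_cycles_alt n
instance (n : Int) (out : List Int) : Decidable (Spec_reciprocal_cycles n out) := by unfold Spec_reciprocal_cycles; infer_instance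

-- ===== CLAIM =====
def Claim_equal_reciprocal_cycles : Prop := ∀ (n : Int), Dom_reciprocal_cycles n → Spec_reciprocal_cycles n (reciprocal_cycles n)

-- ===== LEMMAS AND PROOFS =====

-- ===== LEMMAS AND PROOFS =====

-- the remainder sequence of long division of 1 by d (seq d 0 = 1 % d)
def seq (d : Int) : Nat → Int
  | 0 => PySem.Int.mod 1 d
  | j+1 => PySem.Int.mod (seq d j * 10) d

def stops (d : Int) (i : Nat) : Prop := seq d i = 0 ∨ ∃ t < i, seq d t = seq d i

lemma seq_nonneg (d : Int) (hd : 0 < d) (j : Nat) : 0 ≤ seq d j := by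
  cases j <;> exact PySem.Int.mod_nonneg _ hd

lemma seq_lt (d : Int) (hd : 0 < d) (j : Nat) : seq d j < d := by
  cases j <;> exact PySem.Int.mod_lt _ hd

lemma div_alg_mod (n d : Int) (hn : 0 ≤ n) (hd : 0 < d) :
    (division_algorithm n d).2 = PySem.Int.mod n d := by
  unfold division_algorithm
  by_cases h : d > n
  · rw [if_pos h, PySem.Int.mod_eq_emod_of_pos hd, Int.emod_eq_of_lt hn h]
  · rw [if_neg h]
    have := PySem.Int.floordiv_mul_add_mod n d
    simp only
    rw [mul_comm d (PySem.Int.floordiv n d)]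
    omega

lemma seq_fresh (d : Int) (i0 : Nat) (hmin : ∀ j < i0, ¬ stops d j) {a b : Nat}
    (hab : a < b) (hb : b < i0) : seq d a ≠ seq d b :=
  fun h => hmin b hb (Or.inr ⟨a, hab, h⟩)

lemma seq_nz (d : Int) (i0 : Nat) (hmin : ∀ j < i0, ¬ stops d j) {j : Nat}
    (hj : j < i0) : seq d j ≠ 0 :=
  fun h => hmin j hj (Or.inl h)

-- a repeat occurs among the first d.toNat+1 remainders
lemma exists_repeat (d : Int) (hd : 0 < d) :
    ∃ a b, a < b ∧ b ≤ d.toNat ∧ seq d a = seq d b := by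
  have hcard : (Finset.range d.toNat).card < (Finset.range (d.toNat + 1)).card := by simp
  have hmaps : Set.MapsTo (fun i => (seq d i).toNat)
      ↑(Finset.range (d.toNat + 1)) ↑(Finset.range d.toNat) := by
    intro i _
    simp only [Finset.coe_range, Set.mem_Iio]
    have h1 := seq_lt d hd i
    have h2 := seq_nonneg d hd i
    omega
  obtain ⟨x, hxm, y, hym, hxy, hf⟩ := Finset.exists_ne_map_eq_of_card_lt_of_maps_to hcard hmaps
  simp only [Finset.mem_range] at hxm hym
  have hx := seq_nonneg d hd x
  have hy := seq_nonneg d hd y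
  have heq : seq d x = seq d y := by omega
  rcases Nat.lt_or_ge x y with h | h
  · exact ⟨x, y, h, by omega, heq⟩
  · exact ⟨y, x, by omega, by omega, heq.symm⟩

lemma stops_exists (d : Int) (hd : 0 < d) : ∃ i, stops d i := by
  obtain ⟨a, b, hab, _, he⟩ := exists_repeat d hd
  exact ⟨b, Or.inr ⟨a, hab, he⟩⟩

lemma i0_le (d : Int) (hd : 0 < d) (i0 : Nat) (hmin : ∀ j < i0, ¬ stops d j) :
    i0 ≤ d.toNat := by
  obtain ⟨a, b, hab, hb, he⟩ := exists_repeat d hd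
  by_contra h
  exact hmin b (by omega) (Or.inr ⟨a, hab, he⟩)

lemma seq_per (d : Int) (t0 p : Nat) (hbase : seq d (t0 + p) = seq d t0) :
    ∀ m, t0 ≤ m → seq d (m + p) = seq d m := by
  intro m hm
  induction m, hm using Nat.le_induction with
  | base => exact hbase
  | succ m hm ih =>
    have : m + 1 + p = (m + p) + 1 := by omega
    rw [this]
    show PySem.Int.mod (seq d (m + p) * 10) d = _
    rw [ih]
    rfl

lemma seq_nz_all (d : Int) (i0 t0 : Nat) (hmin : ∀ j < i0, ¬ stops d j)
    (ht0 : t0 < i0) (heq : seq d t0 = seq d i0) : ∀ m, seq d m ≠ 0 := by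
  have hper := seq_per d t0 (i0 - t0) (by rw [show t0 + (i0 - t0) = i0 by omega]; exact heq.symm)
  intro m
  induction m using Nat.strong_induction_on with
  | _ m ih =>
    by_cases hm : m < i0
    · exact seq_nz d i0 hmin hm
    · have h1 : t0 ≤ m - (i0 - t0) := by omega
      have h2 : (m - (i0 - t0)) + (i0 - t0) = m := by omega
      have := hper (m - (i0 - t0)) h1
      rw [h2] at this
      rw [this]
      exact ih (m - (i0 - t0)) (by omega)

-- loop exit for A: once has_cycle or k = 0, the loop returns cycle_length
lemma aLoop_exit (d : Int) (fuel : Nat) (seen : PySem.Set Int) (k : Int) (hc : Bool)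
    (cl : Int) (lf : Option Int) (fc : Bool) (h : ¬(hc = false ∧ k ≠ 0)) :
    findCycleA_loop d fuel seen k hc cl lf fc = cl := by
  cases fuel <;> simp [findCycleA_loop, h]

-- B's loop reaches index i0 and returns 0 (terminating) or i0 - t0 (the period)
lemma bRun (d : Int) (i0 : Nat) (hmin : ∀ j < i0, ¬ stops d j)
    (t0 : Nat) (ht0 : seq d i0 ≠ 0 → t0 < i0 ∧ seq d t0 = seq d i0) :
    ∀ fuel i (pos : PySem.Dict Int Int), i ≤ i0 → i0 - i < fuel →
      (∀ t, t < i → PySem.Dict.get? pos (seq d t) = some (t : Int)) →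
      (∀ x, PySem.Dict.contains pos x = true → ∃ t, t < i ∧ seq d t = x) →
      findCycleB_loop d fuel pos (seq d i) (i : Int) =
        (if seq d i0 = 0 then 0 else (i0 : Int) - (t0 : Int)) := by
  intro fuel
  induction fuel with
  | zero => intro i pos hi hfuel _ _; omega
  | succ fuel ih =>
    intro i pos hi hfuel H1 H2
    by_cases hlt : i < i0
    · have hnz : seq d i ≠ 0 := seq_nz d i0 hmin hlt
      have hcont : PySem.Dict.contains pos (seq d i) = false := by
        cases h : PySem.Dict.contains pos (seq d i) with
        | false => rfl
        | true =>
          obtain ⟨t, ht, he⟩ := H2 _ h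
          exact absurd (Or.inr ⟨t, ht, he⟩) (hmin i hlt)
      rw [findCycleB_loop, if_pos ⟨hnz, hcont⟩]
      have hseq : PySem.Int.mod (seq d i * 10) d = seq d (i + 1) := rfl
      have hcast : (i : Int) + 1 = ((i + 1 : Nat) : Int) := by push_cast; ring
      rw [hseq, hcast]
      apply ih (i + 1) _ (by omega) (by omega)
      · intro t ht
        rcases Nat.lt_or_ge t i with h' | h'
        · rw [PySem.Dict.get?_insert_of_ne _ _ (seq_fresh d i0 hmin h' hlt)]
          exact H1 t h'
        · have ht' : t = i := by omega
          subst ht'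
          exact PySem.Dict.get?_insert_self _ _ _
      · intro x hx
        rw [PySem.Dict.contains_insert] at hx
        rcases Bool.or_eq_true_iff.mp hx with h | h
        · exact ⟨i, by omega, (beq_iff_eq.mp h).symm⟩
        · obtain ⟨t, ht, he⟩ := H2 x h
          exact ⟨t, by omega, he⟩
    · have hieq : i = i0 := by omega
      subst hieq
      by_cases h0 : seq d i = 0
      · rw [findCycleB_loop, if_neg (by simp [h0])]
        simp [h0]
      · obtain ⟨ht0l, ht0e⟩ := ht0 h0
        have hg : PySem.Dict.get? pos (seq d i) = some (t0 : Int) := by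
          rw [← ht0e]; exact H1 t0 ht0l
        have hcont : PySem.Dict.contains pos (seq d i) = true := by
          rw [PySem.Dict.contains_eq_isSome_get?, hg]; rfl
        rw [findCycleB_loop, if_neg (by simp [hcont])]
        rw [if_neg (by simp [h0]), PySem.Dict.getD_of_get?_eq_some _ _ hg, if_neg h0]

-- A's loop in the terminating case: no repeat before the 0 remainder, returns 0
lemma aRunT (d : Int) (hd : 0 < d) (i0 : Nat) (hmin : ∀ j < i0, ¬ stops d j)
    (h0 : seq d i0 = 0) :
    ∀ fuel j (seen : PySem.Set Int), j < i0 → i0 - j < fuel →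
      (∀ x, x ∈ seen ↔ ∃ t, 1 ≤ t ∧ t ≤ j ∧ seq d t = x) →
      findCycleA_loop d fuel seen (seq d j) false 0 none false = 0 := by
  intro fuel
  induction fuel with
  | zero => intro j seen hj hf _; omega
  | succ fuel ih =>
    intro j seen hj hfuel Hs
    have hnz : seq d j ≠ 0 := seq_nz d i0 hmin hj
    rw [findCycleA_loop, if_pos ⟨rfl, hnz⟩]
    have h10 : 0 ≤ seq d j * 10 := by have := seq_nonneg d hd j; omega
    have hr : (division_algorithm (seq d j * 10) d).2 = seq d (j + 1) := by
      rw [div_alg_mod _ _ h10 hd]; rfl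
    have hcontF : PySem.Set.contains seen (seq d (j + 1)) = false := by
      cases h : PySem.Set.contains seen (seq d (j + 1)) with
      | false => rfl
      | true =>
        obtain ⟨t, h1, h2, he⟩ := (Hs _).mp ((PySem.Set.contains_iff _ _).mp h)
        rcases Nat.lt_or_ge (j + 1) i0 with hc | hc
        · exact absurd he (seq_fresh d i0 hmin (by omega) hc)
        · have hji : j + 1 = i0 := by omega
          exact absurd (he.trans (hji ▸ h0)) (seq_nz d i0 hmin (by omega))
    simp only [hr, hcontF]
    simp only [Bool.false_eq_true, false_and, ite_false]
    rcases Nat.lt_or_ge (j + 1) i0 with hc | hc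
    · exact ih (j + 1) _ hc (by omega) (fun x => by
        rw [PySem.Set.mem_add]
        constructor
        · rintro (h | h)
          · obtain ⟨t, h1, h2, he⟩ := (Hs x).mp h
            exact ⟨t, h1, by omega, he⟩
          · exact ⟨j + 1, by omega, le_refl _, h.symm⟩
        · rintro ⟨t, h1, h2, he⟩
          rcases Nat.lt_or_ge t (j + 1) with h' | h'
          · exact Or.inl ((Hs x).mpr ⟨t, h1, by omega, he⟩)
          · have : t = j + 1 := by omega
            subst this
            exact Or.inr he.symm)
    · have hji : j + 1 = i0 := by omega
      rw [hji, h0]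
      exact aLoop_exit d fuel _ 0 false 0 none false (fun ⟨_, h⟩ => h rfl)

-- A's loop phase 2: found_cycle set, counting until look_for recurs, p steps
lemma aRun2 (d : Int) (hd : 0 < d) (j3 p : Nat)
    (hnz : ∀ m, seq d m ≠ 0)
    (hocc : ∀ q, 0 < q → q < p → seq d (j3 + q) ≠ seq d j3)
    (hper : seq d (j3 + p) = seq d j3) :
    ∀ fuel q (seen : PySem.Set Int), q < p → p - q < fuel →
      findCycleA_loop d fuel seen (seq d (j3 + q)) false (q : Int) (some (seq d j3)) true = (p : Int) := by
  intro fuel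
  induction fuel with
  | zero => intro q seen hq hf; omega
  | succ fuel ih =>
    intro q seen hq hfuel
    rw [findCycleA_loop, if_pos ⟨rfl, hnz _⟩]
    have h10 : 0 ≤ seq d (j3 + q) * 10 := by have := seq_nonneg d hd (j3 + q); omega
    have hr : (division_algorithm (seq d (j3 + q) * 10) d).2 = seq d (j3 + q + 1) := by
      rw [div_alg_mod _ _ h10 hd]; rfl
    simp only [hr, Bool.true_eq_false, and_false, ite_false, if_true]
    rcases Nat.lt_or_ge (q + 1) p with hc | hc
    · have hne : seq d (j3 + q + 1) ≠ seq d j3 := by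
        have h := hocc (q + 1) (by omega) hc
        rwa [show j3 + (q + 1) = j3 + q + 1 by omega] at h
      have hb : (seq d (j3 + q + 1) == seq d j3) = false := by simp [hne]
      simp only [hb, Bool.false_eq_true, ite_false]
      have hcast : (q : Int) + 1 = ((q + 1 : Nat) : Int) := by push_cast; ring
      rw [hcast, show j3 + q + 1 = j3 + (q + 1) by omega]
      exact ih (q + 1) _ hc (by omega)
    · have heq2 : seq d (j3 + q + 1) = seq d j3 := by
        rw [show j3 + q + 1 = j3 + p by omega]; exact hper
      have hb : (seq d (j3 + q + 1) == seq d j3) = true := by simp [heq2]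
      simp only [hb, ite_true]
      rw [aLoop_exit d fuel _ _ true _ _ _ (fun h => by simp at h)]
      have : q + 1 = p := by omega
      omega

-- A's loop phase 1 in the repeating case: walk to the first repeat j3, then phase 2
lemma aRunNT1 (d : Int) (hd : 0 < d) (j3 p : Nat) (hp : 0 < p)
    (hnz : ∀ m, seq d m ≠ 0)
    (hocc : ∀ q, 0 < q → q < p → seq d (j3 + q) ≠ seq d j3)
    (hper : seq d (j3 + p) = seq d j3)
    (hfresh : ∀ j, 1 ≤ j → j < j3 → ¬∃ t, 1 ≤ t ∧ t < j ∧ seq d t = seq d j)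
    (hrep : ∃ t, 1 ≤ t ∧ t < j3 ∧ seq d t = seq d j3) :
    ∀ fuel j (seen : PySem.Set Int), j < j3 → (j3 - j) + p + 1 < fuel →
      (∀ x, x ∈ seen ↔ ∃ t, 1 ≤ t ∧ t ≤ j ∧ seq d t = x) →
      findCycleA_loop d fuel seen (seq d j) false 0 none false = (p : Int) := by
  intro fuel
  induction fuel with
  | zero => intro j seen hj hf _; omega
  | succ fuel ih =>
    intro j seen hj hfuel Hs
    rw [findCycleA_loop, if_pos ⟨rfl, hnz _⟩]
    have h10 : 0 ≤ seq d j * 10 := by have := seq_nonneg d hd j; omega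
    have hr : (division_algorithm (seq d j * 10) d).2 = seq d (j + 1) := by
      rw [div_alg_mod _ _ h10 hd]; rfl
    simp only [hr]
    rcases Nat.lt_or_ge (j + 1) j3 with hc | hc
    · have hcontF : PySem.Set.contains seen (seq d (j + 1)) = false := by
        cases h : PySem.Set.contains seen (seq d (j + 1)) with
        | false => rfl
        | true =>
          obtain ⟨t, h1, h2, he⟩ := (Hs _).mp ((PySem.Set.contains_iff _ _).mp h)
          exact absurd ⟨t, h1, by omega, he⟩ (hfresh (j + 1) (by omega) hc)
      simp only [hcontF, Bool.false_eq_true, false_and, ite_false]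
      exact ih (j + 1) _ hc (by omega) (fun x => by
        rw [PySem.Set.mem_add]
        constructor
        · rintro (h | h)
          · obtain ⟨t, h1, h2, he⟩ := (Hs x).mp h
            exact ⟨t, h1, by omega, he⟩
          · exact ⟨j + 1, by omega, le_refl _, h.symm⟩
        · rintro ⟨t, h1, h2, he⟩
          rcases Nat.lt_or_ge t (j + 1) with h' | h'
          · exact Or.inl ((Hs x).mpr ⟨t, h1, by omega, he⟩)
          · have : t = j + 1 := by omega
            subst this
            exact Or.inr he.symm)
    · have hj3 : j + 1 = j3 := by omega
      have hcontT : PySem.Set.contains seen (seq d (j + 1)) = true := by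
        obtain ⟨t, h1, h2, he⟩ := hrep
        exact (PySem.Set.contains_iff _ _).mpr ((Hs _).mpr ⟨t, h1, by omega, by rw [he, hj3]⟩)
      simp only [hcontT, true_and, ite_true]
      rw [hj3]
      have h0 : findCycleA_loop d fuel (PySem.Set.add seen (seq d j3)) (seq d j3) false 0
          (some (seq d j3)) true = (p : Int) := by
        have := aRun2 d hd j3 p hnz hocc hper fuel 0 (PySem.Set.add seen (seq d j3)) hp (by omega)
        rwa [Nat.add_zero] at this
      exact h0

lemma empty_inv (d : Int) : ∀ x : Int, x ∈ (PySem.Set.empty : PySem.Set Int) ↔ ∃ t, 1 ≤ t ∧ t ≤ 0 ∧ seq d t = x := by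
  intro x
  constructor
  · intro h; exact absurd h (by simp [PySem.Set.empty])
  · rintro ⟨t, h1, h2, -⟩; omega

lemma inner_eq (d : Int) (hd : 1 ≤ d) : findCycleA d = findCycleB d := by
  by_cases hd1 : d = 1
  · subst hd1; decide
  · have hdp : 0 < d := by omega
    haveI : DecidablePred (stops d) := fun i => by
      unfold stops; exact inferInstance
    have hex := stops_exists d hdp
    have hstop : stops d (Nat.find hex) := Nat.find_spec hex
    set i0 := Nat.find hex with hi0def
    have hmin : ∀ j < i0, ¬ stops d j := fun j hj => Nat.find_min hex hj
    have hle : i0 ≤ d.toNat := i0_le d hdp i0 hmin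
    have hseq0 : seq d 0 = 1 := by
      show PySem.Int.mod 1 d = 1
      rw [PySem.Int.mod_eq_emod_of_pos hdp, Int.emod_eq_of_lt (by omega) (by omega)]
    have hi0pos : 0 < i0 := by
      rcases Nat.eq_zero_or_pos i0 with h | h
      · exfalso
        rcases h ▸ hstop with h' | ⟨t, ht, -⟩
        · rw [hseq0] at h'; exact one_ne_zero h'
        · omega
      · exact h
    have hBinit : findCycleB d = findCycleB_loop d (d.toNat + 2) PySem.Dict.empty (seq d 0) ((0 : Nat) : Int) := rfl
    have hAinit : findCycleA d = findCycleA_loop d (2 * d.toNat + 4) PySem.Set.empty (seq d 0) false 0 none false := by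
      rw [findCycleA, hseq0]
    by_cases h0 : seq d i0 = 0
    · have hB : findCycleB d = 0 := by
        rw [hBinit, bRun d i0 hmin 0 (fun h => absurd h0 h) (d.toNat + 2) 0 PySem.Dict.empty
          (by omega) (by omega) (fun t ht => by omega)
          (fun x hx => by rw [PySem.Dict.contains_empty] at hx; exact absurd hx (by simp)),
          if_pos h0]
      have hA : findCycleA d = 0 := by
        rw [hAinit]
        exact aRunT d hdp i0 hmin h0 (2 * d.toNat + 4) 0 PySem.Set.empty hi0pos (by omega) (empty_inv d)
      rw [hA, hB]
    · rcases hstop with h | ⟨t0, ht0, heq⟩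
      · exact absurd h h0
      have hp : 0 < i0 - t0 := by omega
      have hper_all := seq_per d t0 (i0 - t0) (by rw [show t0 + (i0 - t0) = i0 by omega]; exact heq.symm)
      have hnz : ∀ m, seq d m ≠ 0 := seq_nz_all d i0 t0 hmin ht0 heq
      have hB : findCycleB d = (i0 : Int) - (t0 : Int) := by
        rw [hBinit, bRun d i0 hmin t0 (fun _ => ⟨ht0, heq⟩) (d.toNat + 2) 0 PySem.Dict.empty
          (by omega) (by omega) (fun t ht => by omega)
          (fun x hx => by rw [PySem.Dict.contains_empty] at hx; exact absurd hx (by simp)),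
          if_neg h0]
      have hA : findCycleA d = ((i0 - t0 : Nat) : Int) := by
        rw [hAinit]
        rcases Nat.eq_zero_or_pos t0 with ht00 | ht0pos
        · -- t0 = 0: the sequence is purely periodic; first repeat at j3 = i0 + 1
          subst ht00
          have hpi : i0 - 0 = i0 := by omega
          rw [hpi] at hp hper_all ⊢
          have hseq1 : seq d (i0 + 1) = seq d 1 := by
            have h := hper_all 1 (by omega)
            rwa [show 1 + i0 = i0 + 1 by omega] at h
          apply aRunNT1 d hdp (i0 + 1) i0 hp hnz ?_ ?_ ?_ ?_ (2 * d.toNat + 4) 0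
            PySem.Set.empty (by omega) (by omega) (empty_inv d)
          · intro q hq hqp
            have e1 : seq d (i0 + 1 + q) = seq d (1 + q) := by
              have h := hper_all (1 + q) (by omega)
              rwa [show 1 + q + i0 = i0 + 1 + q by omega] at h
            rw [e1, hseq1]
            intro hcon
            rcases Nat.lt_or_ge (1 + q) i0 with hlt | hge
            · exact seq_fresh d i0 hmin (by omega) hlt hcon.symm
            · have h1q : 1 + q = i0 := by omega
              have h01 : seq d 0 = seq d 1 := by
                rw [heq, ← h1q, hcon]
              exact seq_fresh d i0 hmin (by omega) (by omega) h01
          · have h := hper_all (i0 + 1) (by omega)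
            rwa [show i0 + 1 + i0 = i0 + 1 + i0 by omega] at h
          · intro j hj1 hjlt ⟨t, h1, h2, he⟩
            rcases Nat.lt_or_ge j i0 with hlt | hge
            · exact seq_fresh d i0 hmin (by omega) hlt he
            · have hji : j = i0 := by omega
              have h0t : seq d 0 = seq d t := by rw [heq, ← hji, he]
              exact seq_fresh d i0 hmin (by omega) (by omega) h0t
          · exact ⟨1, le_refl 1, by omega, hseq1.symm⟩
        · -- 1 ≤ t0: first repeat at j3 = i0
          apply aRunNT1 d hdp i0 (i0 - t0) hp hnz ?_ ?_ ?_ ?_ (2 * d.toNat + 4) 0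
            PySem.Set.empty (by omega) (by omega) (empty_inv d)
          · intro q hq hqp
            have e1 : seq d (i0 + q) = seq d (t0 + q) := by
              have h := hper_all (t0 + q) (by omega)
              rwa [show t0 + q + (i0 - t0) = i0 + q by omega] at h
            rw [e1, ← heq]
            intro hcon
            exact seq_fresh d i0 hmin (by omega) (by omega) hcon.symm
          · exact hper_all i0 (by omega)
          · intro j hj1 hjlt ⟨t, h1, h2, he⟩
            exact seq_fresh d i0 hmin (by omega) hjlt he
          · exact ⟨t0, ht0pos, ht0, heq⟩
      rw [hA, hB]
      omega

-- running best (length, divisor) after divisors 1..j, using B's cycle function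
def bestPair : Nat → Int × Int
  | 0 => (0, 0)
  | j+1 =>
    let L := findCycleB ((j : Int) + 1)
    let pr := bestPair j
    if L > pr.1 then (L, (j : Int) + 1) else pr

lemma outerB (m : Nat) :
    (PySem.List.pyRange 0 (m : Int) 1).foldl (fun (st : List Int × Int × Int) i =>
      (st.1 ++ [(if i > 0 then if findCycleB i > st.2.1 then (findCycleB i, i) else st.2 else st.2).2],
        if i > 0 then if findCycleB i > st.2.1 then (findCycleB i, i) else st.2 else st.2)) ([], 0, 0)
    = ((List.range m).map (fun j => (bestPair j).2), bestPair (m - 1)) := by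
  induction m with
  | zero =>
    rw [Nat.cast_zero, PySem.List.pyRange_one_eq_nil (le_refl 0)]
    rfl
  | succ j ih =>
    have hcast : ((j + 1 : Nat) : Int) = (j : Int) + 1 := by push_cast; ring
    rw [hcast, PySem.List.pyRange_one_succ_right (by positivity), List.foldl_append, ih]
    simp only [List.foldl_cons, List.foldl_nil]
    cases j with
    | zero => simp [bestPair, List.range_succ]
    | succ k =>
      have hpos : ((k + 1 : Nat) : Int) > 0 := by push_cast; omega
      simp only [hpos, if_true, Nat.add_sub_cancel]
      have hbp : (if findCycleB ((k + 1 : Nat) : Int) > (bestPair k).1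
          then (findCycleB ((k + 1 : Nat) : Int), ((k + 1 : Nat) : Int))
          else bestPair k) = bestPair (k + 1) := by
        simp only [bestPair]
        push_cast
        rfl
      rw [hbp]
      refine Prod.ext ?_ rfl
      simp [List.range_succ]

lemma outerA (N : Nat) (hN : 1 ≤ N) :
    ∀ m, 1 ≤ m → m ≤ N →
    (PySem.List.pyRange 1 (m : Int) 1).foldl (fun (st : List Int × Int × Int) i =>
      (st.1.set i.toNat (if findCycleB i > st.2.1 then (findCycleB i, i) else st.2).2,
        if findCycleB i > st.2.1 then (findCycleB i, i) else st.2)) (List.replicate N 0, 0, 0)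
    = ((List.range m).map (fun j => (bestPair j).2) ++ List.replicate (N - m) 0, bestPair (m - 1)) := by
  intro m hm1
  induction m, hm1 using Nat.le_induction with
  | base =>
    intro _
    rw [Nat.cast_one, PySem.List.pyRange_one_eq_nil (le_refl 1)]
    show (List.replicate N (0 : Int), (0 : Int), (0 : Int)) = _
    rw [show N = (N - 1) + 1 by omega, List.replicate_succ]
    simp [bestPair]
  | succ m hm ih =>
    intro hmN
    have ih' := ih (by omega)
    have hcast : ((m + 1 : Nat) : Int) = (m : Int) + 1 := by push_cast; ring
    rw [hcast, PySem.List.pyRange_one_succ_right (by exact_mod_cast hm), List.foldl_append, ih']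
    simp only [List.foldl_cons, List.foldl_nil]
    obtain ⟨k, rfl⟩ : ∃ k, m = k + 1 := ⟨m - 1, by omega⟩
    have hbp : (if findCycleB ((k + 1 : Nat) : Int) > (bestPair (k + 1 - 1)).1
        then (findCycleB ((k + 1 : Nat) : Int), ((k + 1 : Nat) : Int))
        else bestPair (k + 1 - 1)) = bestPair (k + 1) := by
      rw [Nat.add_sub_cancel]
      simp only [bestPair]
      push_cast
      rfl
    rw [hbp]
    refine Prod.ext ?_ ?_
    · have hlen : ((List.range (k + 1)).map (fun j => (bestPair j).2)).length = k + 1 := by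
        simp
      rw [Int.toNat_natCast, List.set_append, hlen, if_neg (by omega), Nat.sub_self,
        show N - (k + 1) = (N - (k + 2)) + 1 by omega, List.replicate_succ, List.set_cons_zero]
      simp [List.range_succ, show N - (k + 1 + 1) = N - (k + 2) by omega]
    · rw [Nat.add_sub_cancel]

-- ===== VERDICT =====
theorem reciprocal_cycles_spec : Claim_equal_reciprocal_cycles := by
  intro n _
  show reciprocal_cycles n = reciprocal_cycles_alt n
  rw [reciprocal_cycles, reciprocal_cycles_alt]
  simp only
  rw [PySem.List.foldl_congr_mem _ _
    (fun (st : List Int × Int × Int) i =>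
      (st.1.set i.toNat (if findCycleB i > st.2.1 then (findCycleB i, i) else st.2).2,
        if findCycleB i > st.2.1 then (findCycleB i, i) else st.2)) _
    (fun acc x hx => by
      have h1 : 1 ≤ x := (PySem.List.mem_pyRange_one.mp hx).1
      simp only [inner_eq x h1])]
  by_cases hn : 0 ≤ n
  · set N := (n + 1).toNat with hNdef
    have hN1 : 1 ≤ N := by omega
    have hcast : ((N : Nat) : Int) = n + 1 := Int.toNat_of_nonneg (by omega)
    rw [← hcast, outerA N hN1 N hN1 (le_refl _), outerB N]
    simp
  · rw [PySem.List.pyRange_one_eq_nil (show n + 1 ≤ 1 by omega),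
      PySem.List.pyRange_one_eq_nil (show n + 1 ≤ 0 by omega)]
    simp [show (n + 1).toNat = 0 by omega]
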